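-- pv_equiv track=rewrite | github.com/GeoRouv/ses-email-service | app/utils/email_validator.py | validate_domain_allowed
-- ===== SOURCE A (Python) =====
-- from typing import Tuple
--
-- def validate_domain_allowed(email: str, allowed_domains: list[str]) -> Tuple[bool, str | None]:
--     """
--     Check if email domain is in allowed list.
--
--     Args:
--         email: Email address to check
--         allowed_domains: List of allowed domains
--
--     Returns:
--         Tuple of (is_allowed, error_message)
--     """
--     if not allowed_domains:
--         return True, None
--
--     _, _, domain = email.partition("@")
--     domain = domain.lower()
--
--     for allowed in allowed_domains:
--         allowed = allowed.lower().strip()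
--         if domain == allowed or domain.endswith(f".{allowed}"):
--             return True, None
--
--     return False, f"Email domain not allowed. Allowed domains: {', '.join(allowed_domains)}"
-- ===== SOURCE B (Python) =====
-- def validate_domain_allowed(email, allowed_domains):
--     if not allowed_domains:
--         return True, None
--     domain = email.partition("@")[2].lower()
--     allowed_set = {a.lower().strip() for a in allowed_domains}
--     candidates = {domain} | {domain[i + 1:] for i, c in enumerate(domain) if c == '.'}
--     if candidates & allowed_set:
--         return True, None
--     return False, "Email domain not allowed. Allowed domains: " + ", ".join(allowed_domains)
-- ===== Notes on version B (the rewrite author's own statement) =====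
-- stated objective: idiomatic
-- what changed: Replaces A's per-entry loop of equality/endswith tests by building a set of normalized allowed domains once and a set of the domain plus all its after-dot suffixes, answering by set intersection.
import Mathlib
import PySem

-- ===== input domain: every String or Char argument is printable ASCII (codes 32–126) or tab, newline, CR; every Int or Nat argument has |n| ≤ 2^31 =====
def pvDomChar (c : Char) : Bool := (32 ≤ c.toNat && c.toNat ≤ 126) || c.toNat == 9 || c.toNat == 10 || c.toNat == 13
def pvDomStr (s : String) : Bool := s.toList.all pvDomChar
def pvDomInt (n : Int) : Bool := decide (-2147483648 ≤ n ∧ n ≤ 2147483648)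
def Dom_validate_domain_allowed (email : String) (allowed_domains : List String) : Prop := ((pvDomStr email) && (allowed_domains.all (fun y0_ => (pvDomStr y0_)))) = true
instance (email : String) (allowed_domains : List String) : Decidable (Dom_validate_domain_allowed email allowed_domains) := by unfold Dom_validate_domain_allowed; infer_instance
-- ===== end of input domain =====

-- B replaces A's per-entry loop of equality/endswith tests by a normalized allowed-set
-- intersected with the set of the domain and its after-dot suffixes (idiomatic, not faster).

-- shared helper: email.partition("@")[2] — the part after the FIRST '@' ("" if no '@');
-- exact for a single-character separator.
def pvAfterSep (sep : Char) : List Char → List Char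
  | [] => []
  | c :: cs => if c = sep then cs else pvAfterSep sep cs

-- shared helper: the error message f"Email domain not allowed. Allowed domains: {', '.join(allowed_domains)}"
def pvMsg (allowed_domains : List String) : String :=
  String.ofList ("Email domain not allowed. Allowed domains: ".toList
    ++ PySem.Chars.join (", ".toList) (allowed_domains.map String.toList))

-- ===== PORT A =====
-- the for-loop of A: first entry matching `domain == allowed or domain.endswith("." + allowed)` → True
def pvALoop (domain : List Char) : List String → Bool
  | [] => false
  | a :: rest =>
    let al := PySem.Chars.strip (PySem.Chars.lower a.toList)
    if domain = al ∨ PySem.Chars.endswith domain ('.' :: al) = true then true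
    else pvALoop domain rest

def validate_domain_allowed (email : String) (allowed_domains : List String) : Bool × Option String :=
  if allowed_domains = [] then (true, none)
  else
    let domain := PySem.Chars.lower (pvAfterSep '@' email.toList)
    if pvALoop domain allowed_domains then (true, none)
    else (false, some (pvMsg allowed_domains))

-- ===== PORT B =====
-- {domain[i+1:] for i, c in enumerate(domain) if c == '.'} (as the generated list; Set.ofList below)
def pvSuffixes (domain : List Char) : List (List Char) :=
  ((PySem.List.enumerate domain 0).filter (fun p => p.2 == '.')).map
    (fun p => domain.drop (p.1.toNat + 1))

def validate_domain_allowed_alt (email : String) (allowed_domains : List String) : Bool × Option String :=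
  if allowed_domains = [] then (true, none)
  else
    let domain := PySem.Chars.lower (pvAfterSep '@' email.toList)
    let allowedSet : PySem.Set (List Char) :=
      PySem.Set.ofList (allowed_domains.map (fun a => PySem.Chars.strip (PySem.Chars.lower a.toList)))
    let candidates : PySem.Set (List Char) :=
      PySem.Set.union (PySem.Set.ofList [domain]) (PySem.Set.ofList (pvSuffixes domain))
    if PySem.Set.inter candidates allowedSet ≠ [] then (true, none)
    else (false, some (pvMsg allowed_domains))

-- ===== PRECONDITION & SPEC =====
def Spec_validate_domain_allowed (email : String) (allowed_domains : List String) (out : Bool × Option String) : Prop := out = validate_domain_allowed_alt email allowed_domains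
instance (email : String) (allowed_domains : List String) (out : Bool × Option String) : Decidable (Spec_validate_domain_allowed email allowed_domains out) := by unfold Spec_validate_domain_allowed; infer_instance

-- ===== CLAIM (what is proved, stated in full; the proofs are below) =====
def Claim_equal_validate_domain_allowed : Prop := ∀ (email : String) (allowed_domains : List String), Dom_validate_domain_allowed email allowed_domains → Spec_validate_domain_allowed email allowed_domains (validate_domain_allowed email allowed_domains)

-- ===== LEMMAS AND PROOFS =====

-- `domain.endswith("." + n)` holds iff n is one of the after-dot suffixes of domain
theorem mem_pvSuffixes_iff (d n : List Char) :
    n ∈ pvSuffixes d ↔ PySem.Chars.endswith d ('.' :: n) = true := by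
  rw [PySem.Chars.endswith_iff]
  simp only [pvSuffixes, List.mem_map, List.mem_filter, PySem.List.mem_enumerate_iff]
  constructor
  · rintro ⟨p, ⟨⟨k, hk, rfl⟩, hdot⟩, rfl⟩
    simp only [beq_iff_eq] at hdot
    refine ⟨d.take k, ?_⟩
    simp only [zero_add, Int.toNat_natCast]
    calc d.take k ++ '.' :: d.drop (k + 1)
        = d.take k ++ d[k] :: d.drop (k + 1) := by rw [hdot]
      _ = d.take k ++ d.drop k := by rw [List.drop_eq_getElem_cons hk]
      _ = d := List.take_append_drop k d
  · rintro ⟨t, ht⟩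
    subst ht
    refine ⟨(0 + (t.length : Int), (t ++ '.' :: n)[t.length]'(by simp)), ⟨⟨t.length, by simp, rfl⟩, ?_⟩, ?_⟩
    · simp [List.getElem_append_right]
    · simp only [zero_add, Int.toNat_natCast]
      have : t ++ '.' :: n = (t ++ ['.']) ++ n := by simp
      rw [this, show t.length + 1 = (t ++ ['.']).length by simp, List.drop_left]

theorem pvALoop_iff (d : List Char) (l : List String) :
    pvALoop d l = true ↔ ∃ a ∈ l,
      d = PySem.Chars.strip (PySem.Chars.lower a.toList) ∨
      PySem.Chars.endswith d ('.' :: PySem.Chars.strip (PySem.Chars.lower a.toList)) = true := by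
  induction l with
  | nil => simp [pvALoop]
  | cons a rest ih =>
    simp only [pvALoop, List.mem_cons]
    split
    · rename_i h
      simp only [true_iff]
      exact ⟨a, Or.inl rfl, h⟩
    · rename_i h
      rw [ih]
      constructor
      · rintro ⟨b, hb, hm⟩; exact ⟨b, Or.inr hb, hm⟩
      · rintro ⟨b, hb | hb, hm⟩
        · exact absurd (hb ▸ hm) h
        · exact ⟨b, hb, hm⟩

theorem inter_iff (d : List Char) (l : List String) :
    PySem.Set.inter
        (PySem.Set.union (PySem.Set.ofList [d]) (PySem.Set.ofList (pvSuffixes d)))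
        (PySem.Set.ofList (l.map (fun a => PySem.Chars.strip (PySem.Chars.lower a.toList)))) ≠ ([] : List (List Char)) ↔
      pvALoop d l = true := by
  rw [pvALoop_iff, ne_eq, List.eq_nil_iff_forall_not_mem]
  push Not
  constructor
  · rintro ⟨x, hx⟩
    rw [PySem.Set.mem_inter] at hx
    obtain ⟨hc, ha⟩ := hx
    rw [PySem.Set.mem_union, PySem.Set.mem_ofList, PySem.Set.mem_ofList] at hc
    rw [PySem.Set.mem_ofList, List.mem_map] at ha
    obtain ⟨a, hal, rfl⟩ := ha
    refine ⟨a, hal, ?_⟩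
    rcases hc with hc | hc
    · exact Or.inl (List.mem_singleton.mp hc).symm
    · exact Or.inr ((mem_pvSuffixes_iff d _).mp hc)
  · rintro ⟨a, hal, hm⟩
    refine ⟨PySem.Chars.strip (PySem.Chars.lower a.toList), ?_⟩
    rw [PySem.Set.mem_inter, PySem.Set.mem_union, PySem.Set.mem_ofList, PySem.Set.mem_ofList,
      PySem.Set.mem_ofList]
    refine ⟨?_, List.mem_map.mpr ⟨a, hal, rfl⟩⟩
    rcases hm with hm | hm
    · exact Or.inl (by simp [hm])
    · exact Or.inr ((mem_pvSuffixes_iff d _).mpr hm)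

-- ===== VERDICT (by name: the statement is the Claim_ definition above) =====
theorem validate_domain_allowed_spec : Claim_equal_validate_domain_allowed := by
  intro email ads _
  unfold Spec_validate_domain_allowed validate_domain_allowed validate_domain_allowed_alt
  by_cases h0 : ads = []
  · simp [h0]
  · simp only [if_neg h0]
    by_cases h : pvALoop (PySem.Chars.lower (pvAfterSep '@' email.toList)) ads = true
    · rw [if_pos h, if_pos ((inter_iff _ _).mpr h)]
    · rw [if_neg h, if_neg (fun hc => h ((inter_iff _ _).mp hc))]
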